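-- pv_equiv track=rewrite | github.com/KsenyaNikitchenko/laboraatornaya1 | task11-14.py | elements_in_text
-- ===== SOURCE A (Python) =====
-- def element_in_string(s):
--     alpha=""
--     counteleminstr=0
--     for i in s:
--         if(s.count(i)>counteleminstr):
--             alpha=i
--             counteleminstr=s.count(i)
--     return alpha
--
-- def elements_in_text(text):
--     alpha=""
--     elements={}
--     for i in text:
--         alpha=element_in_string(i)
--         if(alpha not in elements):
--             elements[alpha]=i.count(alpha)
--         else:
--             elements[alpha]+=i.count(alpha)
--     return elements
-- ===== SOURCE B (Python) =====
-- def best_with_count(s):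
--     ranked = sorted(dict.fromkeys(s), key=lambda c: -s.count(c))
--     best = ranked[0] if ranked else ""
--     return best, s.count(best)
--
-- def elements_in_text(text):
--     elements = {}
--     for best, cnt in map(best_with_count, text):
--         elements[best] = elements.get(best, 0) + cnt
--     return elements
-- ===== Notes on version B (the rewrite author's own statement) =====
-- stated objective: alternative
-- what changed: Per string, B stably SORTS the distinct characters (dict.fromkeys) by descending count and takes the head of the sorted list instead of A's rescanning running-max over every character position, and the program is staged into a map producing (best, count) pairs followed by a separate aggregation pass with get-with-default instead of A's interleaved membership branch.
import Mathlib
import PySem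

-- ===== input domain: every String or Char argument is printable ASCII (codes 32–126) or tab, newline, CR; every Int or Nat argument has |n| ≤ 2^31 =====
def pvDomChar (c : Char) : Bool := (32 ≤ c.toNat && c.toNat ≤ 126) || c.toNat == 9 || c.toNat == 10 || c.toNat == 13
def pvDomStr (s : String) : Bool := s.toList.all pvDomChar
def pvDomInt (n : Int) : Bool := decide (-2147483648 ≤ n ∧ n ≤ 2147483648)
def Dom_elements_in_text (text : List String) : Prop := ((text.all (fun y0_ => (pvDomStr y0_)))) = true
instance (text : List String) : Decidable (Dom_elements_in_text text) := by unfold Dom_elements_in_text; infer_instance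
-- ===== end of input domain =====

-- B replaces A's rescanning running-max per string by a stable sort of the distinct characters by descending count (head = best) and stages the program into a map of (best, count) pairs followed by a separate aggregation pass (objective: alternative).

-- ===== PORT A =====
def element_in_string (s : String) : String :=
  (s.toList.foldl
    (fun (st : String × Int) i =>
      if (PySem.Str.count s (String.ofList [i]) : Int) > st.2 then
        (String.ofList [i], (PySem.Str.count s (String.ofList [i]) : Int))
      else st)
    ("", 0)).1

def elements_in_text (text : List String) : List (String × Int) :=
  (text.foldl
    (fun (elements : PySem.Dict String Int) i =>
      let alpha := element_in_string i
      if elements.contains alpha = false then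
        elements.insert alpha ((PySem.Str.count i alpha : Nat) : Int)
      else
        elements.modify alpha 0 (· + ((PySem.Str.count i alpha : Nat) : Int)))
    PySem.Dict.empty).items

-- ===== PORT B =====
-- ranked = sorted(dict.fromkeys(s), key=lambda c: -s.count(c)); best = ranked[0] if ranked else "" (the guard makes the [0] total)
def best_with_count (s : String) : String × Int :=
  let ranked := PySem.List.sorted (PySem.List.dedup s.toList)
      (fun c => -((PySem.Str.count s (String.ofList [c]) : Nat) : Int))
  let best : String :=
    match ranked with
    | [] => ""
    | c :: _ => String.ofList [c]
  (best, ((PySem.Str.count s best : Nat) : Int))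

def elements_in_text_alt (text : List String) : List (String × Int) :=
  ((text.map best_with_count).foldl
    (fun (elements : PySem.Dict String Int) p =>
      elements.insert p.1 (elements.getD p.1 0 + p.2))
    PySem.Dict.empty).items

-- ===== PRECONDITION & SPEC =====
def Spec_elements_in_text (text : List String) (out : List (String × Int)) : Prop := out = elements_in_text_alt text
instance (text : List String) (out : List (String × Int)) : Decidable (Spec_elements_in_text text out) := by unfold Spec_elements_in_text; infer_instance

-- ===== CLAIM (what is proved, stated in full; the proofs are below) =====
def Claim_equal_elements_in_text : Prop := ∀ (text : List String), Dom_elements_in_text text → Spec_elements_in_text text (elements_in_text text)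

-- ===== LEMMAS AND PROOFS =====

-- counting a single-character substring is plain list count
theorem go_single (c : Char) : ∀ (l : List Char) (fuel acc : Nat), l.length ≤ fuel →
    PySem.Chars.count.go [c] fuel l acc = acc + l.count c := by
  intro l
  induction l with
  | nil => intro fuel acc h; cases fuel <;> simp [PySem.Chars.count.go]
  | cons a t ih =>
    intro fuel acc h
    cases fuel with
    | zero => simp at h
    | succ f =>
      rw [PySem.Chars.count.go]
      by_cases hca : c = a
      · subst hca
        simp [List.isPrefixOf, ih f (acc + 1) (by simpa using h)]
        omega
      · simp [List.isPrefixOf, hca, ih f acc (by simpa using h), Ne.symm hca]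

theorem chars_count_single (l : List Char) (c : Char) :
    PySem.Chars.count l [c] = l.count c := by
  simp [PySem.Chars.count, go_single]

-- the option-valued fold behind PySem.List.max?, and its pure twin
def stepOpt (key : Char → Int) (acc : Option Char) (x : Char) : Option Char :=
  match acc with
  | none => some x
  | some m => if key m < key x then some x else some m

def stepC (key : Char → Int) (m x : Char) : Char :=
  if key m < key x then x else m

theorem max?_eq_foldl_stepOpt (key : Char → Int) (xs : List Char) :
    PySem.List.max? xs key = xs.foldl (stepOpt key) none := by
  unfold PySem.List.max?
  congr 1
  funext acc x
  cases acc <;> simp [stepOpt]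

theorem foldl_stepOpt_isSome (key : Char → Int) (xs : List Char) (acc : Option Char)
    (h : acc.isSome) : (xs.foldl (stepOpt key) acc).isSome := by
  induction xs generalizing acc with
  | nil => exact h
  | cons x xs ih =>
    cases acc with
    | none => simp at h
    | some m =>
      simp only [List.foldl_cons, stepOpt]
      by_cases hk : key m < key x <;> simp [hk] <;> exact ih _ rfl

theorem foldl_stepOpt_some (key : Char → Int) (xs : List Char) : ∀ m : Char,
    xs.foldl (stepOpt key) (some m) = some (xs.foldl (stepC key) m) := by
  induction xs with
  | nil => intro m; rfl
  | cons x xs ih =>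
    intro m
    simp only [List.foldl_cons, stepOpt, stepC]
    by_cases h : key m < key x <;> simp [h, ih]

-- A's strict-improvement fold, once it holds a best element, tracks the option fold
theorem fold_couple (key : Char → Int) (xs : List Char) : ∀ (m : Char),
    xs.foldl (fun st i => if key i > st.2 then (String.ofList [i], key i) else st) (String.ofList [m], key m)
      = match xs.foldl (stepOpt key) (some m) with
        | some m' => (String.ofList [m'], key m')
        | none => ("", 0) := by
  induction xs with
  | nil => intro m; rfl
  | cons x xs ih =>
    intro m
    simp only [List.foldl_cons, stepOpt]
    by_cases h : key m < key x
    · simp [h, gt_iff_lt, ih]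
    · simp [h, gt_iff_lt, ih]

theorem fold_couple0 (key : Char → Int) (xs : List Char) (h : ∀ c ∈ xs, 0 < key c) :
    xs.foldl (fun st i => if key i > st.2 then (String.ofList [i], key i) else st) ("", 0)
      = match xs.foldl (stepOpt key) none with
        | some m' => (String.ofList [m'], key m')
        | none => ("", 0) := by
  cases xs with
  | nil => rfl
  | cons x xs =>
    simp only [List.foldl_cons, stepOpt]
    rw [if_pos (by exact h x (by simp))]
    exact fold_couple key xs x

-- elements already seen never improve the option fold, so dedup (PySem.Set.add) is invisible to it
theorem fold_dedup (key : Char → Int) (xs : List Char) : ∀ (seen : List Char),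
    xs.foldl (stepOpt key) (seen.foldl (stepOpt key) none)
      = (List.foldl PySem.Set.add seen xs).foldl (stepOpt key) none := by
  induction xs with
  | nil => intro seen; rfl
  | cons x xs ih =>
    intro seen
    simp only [List.foldl_cons]
    by_cases h : seen.contains x
    · have hmem : x ∈ seen := by simpa using h
      have hadd : PySem.Set.add seen x = seen := by simp [PySem.Set.add, hmem]
      have hsome : (seen.foldl (stepOpt key) none).isSome := by
        cases seen with
        | nil => simp at hmem
        | cons a t => exact foldl_stepOpt_isSome key t _ rfl
      obtain ⟨m, hm⟩ := Option.isSome_iff_exists.mp hsome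
      have hle : key x ≤ key m :=
        PySem.List.max?_isMax (by rw [max?_eq_foldl_stepOpt, hm]) x hmem
      have hstep : stepOpt key (some m) x = some m := by
        simp [stepOpt, not_lt.mpr hle]
      rw [hadd, hm, hstep, ← hm, ih seen]
    · rw [show PySem.Set.add seen x = seen ++ [x] by
        simp [PySem.Set.add, (by simpa using h : x ∉ seen)]]
      rw [← ih (seen ++ [x]), List.foldl_append]
      rfl

-- the head of the insertion-sort fold is the running best under the sort key (stability: ties keep the earlier element)
theorem foldl_insertBy_head (kb : Char → Int) : ∀ (xs : List Char) (m : Char) (rest : List Char),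
    ∃ t, xs.foldl (fun acc x => PySem.List.insertBy (fun a b => decide (kb a < kb b)) x acc) (m :: rest)
      = (xs.foldl (fun m x => if kb x < kb m then x else m) m) :: t := by
  intro xs
  induction xs with
  | nil => intro m rest; exact ⟨rest, rfl⟩
  | cons x xs ih =>
    intro m rest
    simp only [List.foldl_cons, PySem.List.insertBy]
    by_cases h : kb x < kb m
    · simp only [h, decide_true, if_true]
      exact ih x (m :: rest)
    · simp only [h, decide_false, if_false]
      exact ih m (PySem.List.insertBy (fun a b => decide (kb a < kb b)) x rest)

-- the head of Python's stable sort of (c :: ds) by a negated key is the strict running best under the key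
theorem sorted_head (key : Char → Int) (c : Char) (ds : List Char) :
    ∃ t, PySem.List.sorted (c :: ds) (fun z => -(key z)) = (ds.foldl (stepC key) c) :: t := by
  rw [PySem.List.sorted_eq_foldl_insertBy]
  simp only [List.foldl_cons]
  obtain ⟨t, ht⟩ := foldl_insertBy_head (fun z => -(key z)) ds c []
  refine ⟨t, ?_⟩
  rw [show PySem.List.insertBy (fun a b => decide ((fun z => -(key z)) a < (fun z => -(key z)) b)) c [] = [c] from rfl]
  rw [ht]
  congr 1
  apply PySem.List.foldl_congr_mem
  intro m y _
  simp [stepC, neg_lt_neg_iff]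

-- the heart of the equivalence: A's rescanning argmax equals the head of B's stable sort
theorem inner (s : String) : element_in_string s = (best_with_count s).1 := by
  have hcnt : ∀ i : Char, ((PySem.Str.count s (String.ofList [i]) : Nat) : Int)
      = ((s.toList.count i : Nat) : Int) := by
    intro i; simp [PySem.Str.count, chars_count_single]
  unfold element_in_string best_with_count
  simp only [hcnt]
  generalize s.toList = l
  cases l with
  | nil => decide
  | cons x rest =>
    have hxd : x ∈ PySem.List.dedup (x :: rest) := by
      rw [PySem.List.mem_dedup]; simp
    cases hd : PySem.List.dedup (x :: rest) with
    | nil => rw [hd] at hxd; simp at hxd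
    | cons c ds =>
      -- A side
      rw [fold_couple0 _ _ (by
        intro c hc
        have : 0 < (x :: rest).count c := List.count_pos_iff.mpr hc
        exact_mod_cast this)]
      rw [show (List.foldl (stepOpt fun c => (((x :: rest).count c : Nat) : Int)) none (x :: rest))
            = ((PySem.List.dedup (x :: rest)).foldl (stepOpt fun c => (((x :: rest).count c : Nat) : Int)) none) by
        rw [PySem.List.dedup_eq_ofList, PySem.Set.ofList,
            show (PySem.Set.empty : PySem.Set Char) = ([] : List Char) from rfl,
            ← fold_dedup _ (x :: rest) []]
        rfl]
      rw [hd]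
      simp only [List.foldl_cons, stepOpt]
      rw [foldl_stepOpt_some]
      -- B side
      obtain ⟨t, ht⟩ := sorted_head (fun z => (((x :: rest).count z : Nat) : Int)) c ds
      rw [ht]

-- the two loop bodies agree on every dict state and string
theorem step_eq (d : PySem.Dict String Int) (s : String) :
    (let alpha := element_in_string s;
     if d.contains alpha = false then
       d.insert alpha ((PySem.Str.count s alpha : Nat) : Int)
     else
       d.modify alpha 0 (· + ((PySem.Str.count s alpha : Nat) : Int)))
    = d.insert (best_with_count s).1 (d.getD (best_with_count s).1 0 + (best_with_count s).2) := by
  have h2 : (best_with_count s).2 = ((PySem.Str.count s (best_with_count s).1 : Nat) : Int) := rfl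
  rw [show (let alpha := element_in_string s;
     if d.contains alpha = false then
       d.insert alpha ((PySem.Str.count s alpha : Nat) : Int)
     else
       d.modify alpha 0 (· + ((PySem.Str.count s alpha : Nat) : Int)))
     = (if d.contains (element_in_string s) = false then
       d.insert (element_in_string s) ((PySem.Str.count s (element_in_string s) : Nat) : Int)
     else
       d.modify (element_in_string s) 0 (· + ((PySem.Str.count s (element_in_string s) : Nat) : Int))) from rfl]
  rw [inner s, h2]
  by_cases hc : d.contains (best_with_count s).1
  · rw [if_neg (by simp [hc])]
    rfl
  · rw [if_pos (by simp [hc])]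
    have h0 : d.getD (best_with_count s).1 0 = 0 := by
      simp only [PySem.Dict.contains, List.any_eq_true, not_exists, not_and] at hc
      have hfind : d.items.find? (fun p => p.1 == (best_with_count s).1) = none := by
        rw [List.find?_eq_none]
        intro p hp
        simp only [Bool.not_eq_true]
        by_contra hb
        exact hc p hp (by simpa using hb)
      simp [PySem.Dict.getD, PySem.Dict.get?, hfind]
    rw [h0, zero_add]

-- ===== VERDICT (by name: the statement is the Claim_ definition above) =====
theorem elements_in_text_spec : Claim_equal_elements_in_text := by
  intro text _
  unfold Spec_elements_in_text elements_in_text elements_in_text_alt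
  rw [List.foldl_map]
  congr 1
  exact List.foldl_ext _ _ _ (fun d s _ => step_eq d s)
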